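-- pv_equiv track=rewrite | github.com/rnjsvlfwp/algorithm | review/week_01/the_least_upside_down.py | the_least_upside_down
-- ===== SOURCE A (Python) =====
-- def the_least_upside_down(array):
--     count_one = 0
--     count_zero = 0
--
--     if array[0] == '0':
--         count_zero += 1
--     elif array[0] == '1':
--         count_one += 1
--
--     for index in range(len(array) - 1):
--         if array[index] != array[index + 1]:
--             if array[index + 1] == '1':
--                 count_one += 1
--             elif array[index + 1] == '0':
--                 count_zero += 1
--     return min(count_one, count_zero)
-- ===== SOURCE B (Python) =====
-- def the_least_upside_down(array):
--     # Mask every character except the target with a space, then tokenize: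
--     # the whitespace-split words are exactly the maximal runs of that character.
--     ones = ''.join(c if c == '1' else ' ' for c in array).split()
--     zeros = ''.join(c if c == '0' else ' ' for c in array).split()
--     return min(len(ones), len(zeros))
-- ===== Notes on version B (the rewrite author's own statement) =====
-- stated objective: alternative
-- what changed: Replaces the seeded transition-counting scan (two counters updated on adjacent index pairs) with a mask-and-tokenize approach: blank out all but the target character and let str.split() produce the maximal runs, counting words per symbol.
import Mathlib
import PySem

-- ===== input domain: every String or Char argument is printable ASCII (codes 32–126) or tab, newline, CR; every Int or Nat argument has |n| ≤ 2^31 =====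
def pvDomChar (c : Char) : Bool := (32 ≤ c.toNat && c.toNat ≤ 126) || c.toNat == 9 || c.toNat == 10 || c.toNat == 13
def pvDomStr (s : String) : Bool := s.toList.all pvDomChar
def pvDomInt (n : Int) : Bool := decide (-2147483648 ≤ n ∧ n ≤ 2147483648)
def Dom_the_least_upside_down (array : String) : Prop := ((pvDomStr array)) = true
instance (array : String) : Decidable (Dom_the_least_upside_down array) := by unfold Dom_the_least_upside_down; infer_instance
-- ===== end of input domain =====

-- B replaces A's transition-counting scan by masking all but the target character with spaces
-- and tokenizing with str.split(): the words are the maximal runs;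
-- an alternative decomposition with the same asymptotics. Pre_ excludes the empty string, on which A raises IndexError at array[0].


-- ===== PORT A =====
def the_least_upside_down (array : String) : Int :=
  let cs := array.toList
  let init : Int × Int :=            -- (count_one, count_zero) after the if/elif on array[0]
    if PySem.List.pyGetD cs 0 ' ' = '0' then (0, 1)
    else if PySem.List.pyGetD cs 0 ' ' = '1' then (1, 0)
    else (0, 0)
  let r :=
    (PySem.List.pyRange 0 ((cs.length : Int) - 1)).foldl
      (fun (st : Int × Int) index =>
        if PySem.List.pyGetD cs index ' ' ≠ PySem.List.pyGetD cs (index + 1) ' ' then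
          (if PySem.List.pyGetD cs (index + 1) ' ' = '1' then (st.1 + 1, st.2)
           else if PySem.List.pyGetD cs (index + 1) ' ' = '0' then (st.1, st.2 + 1)
           else st)
        else st) init
  min r.1 r.2

-- ===== PORT B =====
-- ''.join(c if c == k else ' ' for c in array).split()   — ported on the List Char side
-- (PySem.Str.split₀ is a thin wrapper over PySem.Chars.split₀ on toList)
def pvMaskSplit (k : Char) (cs : List Char) : List (List Char) :=
  PySem.Chars.split₀ (cs.map (fun c => if c = k then c else ' '))

def the_least_upside_down_alt (array : String) : Int :=
  let ones := pvMaskSplit '1' array.toList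
  let zeros := pvMaskSplit '0' array.toList
  min ((ones.length : Int)) ((zeros.length : Int))

-- ===== PRECONDITION & SPEC =====
-- Pre_ excludes only the empty string, on which A raises IndexError at array[0].
def Pre_the_least_upside_down (array : String) : Prop := array.toList ≠ []
instance (array : String) : Decidable (Pre_the_least_upside_down array) := by unfold Pre_the_least_upside_down; infer_instance
def pvWitness_the_least_upside_down : String := "0101"

def Spec_the_least_upside_down (array : String) (out : Int) : Prop := out = the_least_upside_down_alt array
instance (array : String) (out : Int) : Decidable (Spec_the_least_upside_down array out) := by unfold Spec_the_least_upside_down; infer_instance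

-- ===== CLAIM (what is proved, stated in full; the proofs are below) =====
def Claim_equal_the_least_upside_down : Prop := ∀ (array : String), Dom_the_least_upside_down array → Pre_the_least_upside_down array → Spec_the_least_upside_down array (the_least_upside_down array)

-- ===== LEMMAS AND PROOFS =====

-- A's loop body on one adjacent pair (count_one, count_zero)
def pvStep (a b : Char) (st : Int × Int) : Int × Int :=
  if a ≠ b then
    (if b = '1' then (st.1 + 1, st.2)
     else if b = '0' then (st.1, st.2 + 1)
     else st)
  else st

-- A's loop, structurally: fold pvStep over the adjacent pairs of a :: t
def pvPairFold : Char → List Char → Int × Int → Int × Int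
  | _, [], st => st
  | a, b :: t, st => pvPairFold b t (pvStep a b st)

-- number of adjacent transitions into character c along a :: t
def pvTrans (c : Char) : Char → List Char → Nat
  | _, [] => 0
  | a, b :: t => (if a ≠ b ∧ b = c then 1 else 0) + pvTrans c b t

-- number of maximal runs of c in the tail, given whether we are currently inside a c-run
def pvRunsFrom (c : Char) : Bool → List Char → Nat
  | _, [] => 0
  | inRun, a :: t =>
    if a = c then (if inRun then 0 else 1) + pvRunsFrom c true t
    else pvRunsFrom c false t

lemma pvBridge (t : List Char) (a : Char) (st : Int × Int) :
    List.foldl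
      (fun (st : Int × Int) (k : Nat) =>
        pvStep (PySem.List.pyGetD (a :: t) (k : Int) ' ')
               (PySem.List.pyGetD (a :: t) ((k : Int) + 1) ' ') st)
      st (List.range t.length) = pvPairFold a t st := by
  induction t generalizing a st with
  | nil => simp [pvPairFold]
  | cons b t ih =>
    have hcast : ∀ (k : Nat), ((k : Int) + 1) = (((k + 1 : Nat) : Int)) := by
      intro k; push_cast; ring
    simp only [List.length_cons, List.range_succ_eq_map, List.foldl_cons, List.foldl_map,
      hcast, PySem.List.pyGetD_natCast, List.getD_cons_succ]
    simp only [List.getD_cons_zero]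
    have hih := ih b (pvStep a b st)
    simp only [PySem.List.pyGetD_natCast, hcast, List.getD_cons_succ] at hih
    simp only [pvPairFold]
    exact hih

lemma pvPairFold_eq (t : List Char) (a : Char) (o z : Int) :
    pvPairFold a t (o, z) = (o + (pvTrans '1' a t : Int), z + (pvTrans '0' a t : Int)) := by
  induction t generalizing a o z with
  | nil => simp [pvPairFold, pvTrans]
  | cons b t ih =>
    simp only [pvPairFold, pvTrans, pvStep]
    by_cases hab : a = b
    · simp [hab, ih]
    · by_cases h1 : b = '1'
      · subst h1
        simp only [hab, ne_eq, not_false_iff, if_true, ih]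
        have h10 : ¬ ('1' : Char) = '0' := by decide
        simp [h10]
        all_goals ring
      · by_cases h0 : b = '0'
        · subst h0
          simp only [hab, ne_eq, not_false_iff, if_true, h1]
          simp only [ih]
          simp
          all_goals ring
        · simp [hab, h1, h0, ih]

-- invariant of split₀.go on lists over the alphabet {c, ' '} (c not whitespace)
lemma pvGo_length (c : Char) (hc : PySem.Chars.isspace c = false)
    (xs : List Char) (hxs : ∀ x ∈ xs, x = c ∨ x = ' ')
    (cur : List Char) (acc : List (List Char)) :
    (PySem.Chars.split₀.go xs cur acc).length
      = acc.length + (if cur.isEmpty then 0 else 1) + pvRunsFrom c (!cur.isEmpty) xs := by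
  induction xs generalizing cur acc with
  | nil =>
    cases hcur : cur.isEmpty <;>
      simp [PySem.Chars.split₀.go, pvRunsFrom, hcur]
  | cons x rest ih =>
    have hrest : ∀ y ∈ rest, y = c ∨ y = ' ' := fun y hy => hxs y (by simp [hy])
    have hx : x = c ∨ x = ' ' := hxs x (by simp)
    rcases hx with hx | hx
    · subst hx
      rw [PySem.Chars.split₀.go]
      rw [if_neg (by simp [hc])]
      rw [ih hrest]
      cases hcur : cur.isEmpty
      · simp [pvRunsFrom, hcur, List.isEmpty_iff] at *
      · have h2 : (x :: cur).isEmpty = false := by simp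
        simp [pvRunsFrom, hcur, h2]
        omega
    · subst hx
      rw [PySem.Chars.split₀.go]
      rw [if_pos (by decide)]
      have hsp : (' ' = c) = False := by
        simp only [eq_iff_iff, iff_false]
        intro hcc; rw [← hcc] at hc; exact absurd hc (by decide)
      cases hcur : cur.isEmpty
      · rw [if_neg (by simp [hcur])]
        rw [ih hrest]
        simp [pvRunsFrom, hsp]
      · rw [if_pos (by simp_all [List.isEmpty_iff])]
        rw [ih hrest]
        simp [pvRunsFrom, hsp, hcur]

-- pvRunsFrom only tests equality with c, and masking preserves "= c"
lemma pvRunsFrom_mask (c : Char) (hc : c ≠ ' ') (b : Bool) (l : List Char) :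
    pvRunsFrom c b (l.map (fun ch => if ch = c then ch else ' ')) = pvRunsFrom c b l := by
  induction l generalizing b with
  | nil => rfl
  | cons a t ih =>
    by_cases h : a = c
    · simp [pvRunsFrom, h, ih]
    · simp [pvRunsFrom, h, Ne.symm hc, ih]

-- runs counted from outside a run = initial indicator + transitions into c
lemma pvRunsFrom_trans (c : Char) (t : List Char) (prev : Char) :
    pvRunsFrom c (decide (prev = c)) t = pvTrans c prev t := by
  induction t generalizing prev with
  | nil => rfl
  | cons b t ih =>
    by_cases hb : b = c
    · subst hb
      by_cases hp : prev = b
      · simp [pvRunsFrom, pvTrans, hp, ← ih, decide_eq_true_iff]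
      · simp [pvRunsFrom, pvTrans, hp, Ne.symm, ← ih b, decide_eq_true_iff]
    · simp [pvRunsFrom, pvTrans, hb, ← ih b, decide_eq_false hb]

-- word count of the masked split = initial indicator + transitions into c
lemma pvMaskSplit_length (c : Char) (hc : PySem.Chars.isspace c = false) (hc' : c ≠ ' ')
    (a : Char) (t : List Char) :
    (pvMaskSplit c (a :: t)).length = (if a = c then 1 else 0) + pvTrans c a t := by
  have hmem : ∀ x ∈ (a :: t).map (fun ch => if ch = c then ch else ' '), x = c ∨ x = ' ' := by
    intro x hx
    rcases List.mem_map.mp hx with ⟨ch, _, rfl⟩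
    by_cases h : ch = c <;> simp [h]
  have := pvGo_length c hc ((a :: t).map (fun ch => if ch = c then ch else ' ')) hmem [] []
  unfold pvMaskSplit PySem.Chars.split₀
  rw [this]
  simp only [List.length_nil, List.isEmpty_nil, if_true, Bool.not_true]
  rw [pvRunsFrom_mask c hc' false]
  have h := pvRunsFrom_trans c t a
  simp only [pvRunsFrom]
  by_cases ha : a = c
  · simp only [ha, if_pos rfl, Bool.false_eq_true, if_neg (by simp : ¬False)]
    have := pvRunsFrom_trans c t c
    simp only [decide_eq_true_iff] at this ⊢
    simp [← this]
  · simp only [if_neg ha]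
    have := pvRunsFrom_trans c t a
    rw [decide_eq_false ha] at this
    simp [ha, this]

-- ===== VERDICT (by name: the statement is the Claim_ definition above) =====
theorem the_least_upside_down_spec : Claim_equal_the_least_upside_down := by
  intro array _ hpre
  unfold Spec_the_least_upside_down
  rcases h : array.toList with _ | ⟨a, t⟩
  · exact absurd h hpre
  · simp only [the_least_upside_down, the_least_upside_down_alt, h]
    have hlen : (((a :: t).length : Int) - 1) = ((t.length : Nat) : Int) := by
      simp
    rw [hlen, PySem.List.pyRange_zero_nat, List.foldl_map]
    have hbody :
        (fun (st : Int × Int) (k : Nat) =>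
          if PySem.List.pyGetD (a :: t) (k : Int) ' ' ≠ PySem.List.pyGetD (a :: t) ((k : Int) + 1) ' ' then
            (if PySem.List.pyGetD (a :: t) ((k : Int) + 1) ' ' = '1' then (st.1 + 1, st.2)
             else if PySem.List.pyGetD (a :: t) ((k : Int) + 1) ' ' = '0' then (st.1, st.2 + 1)
             else st)
          else st)
        = (fun (st : Int × Int) (k : Nat) =>
            pvStep (PySem.List.pyGetD (a :: t) (k : Int) ' ')
                   (PySem.List.pyGetD (a :: t) ((k : Int) + 1) ' ') st) := rfl
    rw [hbody, pvBridge]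
    have h0 : PySem.List.pyGetD (a :: t) 0 ' ' = a := by
      simp [PySem.List.pyGetD_zero_cons]
    rw [h0]
    have c1 := pvMaskSplit_length '1' (by decide) (by decide) a t
    have c0 := pvMaskSplit_length '0' (by decide) (by decide) a t
    by_cases ha0 : a = '0'
    · subst ha0
      rw [if_pos rfl, pvPairFold_eq]
      simp only [c1, c0]
      norm_num
    · rw [if_neg ha0]
      by_cases ha1 : a = '1'
      · subst ha1
        rw [if_pos rfl, pvPairFold_eq]
        simp only [c1, c0]
        norm_num [ha0]
      · rw [if_neg ha1, pvPairFold_eq]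
        simp only [c1, c0, ha0, ha1]
        norm_num
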